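-- pv_equiv track=rewrite | github.com/kiselevskaya/Bioinformatics | comparing_genes_proteins_genomes/sequence_alignment/manhattan_tourist.py | manhattan_tourist
-- ===== SOURCE A (Python) =====
-- def manhattan_tourist(n, m, down, right, cross=None):
--     '''
--     :param n: number of rows
--     :param m: number of columns
--     :param down: matrix for weight of vertical edges
--     :param right: matrix for weight of horizontal edges
--     :return: integer - the biggest weight in path from position 0,0 to n,m
--     '''
--
--     weight_matrix = []
--     for i in range(n+1):
--         weight_matrix.append([0]*(m+1))
--
--     for i in range(1, n+1):
--         weight_matrix[i][0] = weight_matrix[i-1][0] + down[i-1][0]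
--     for j in range(1, m+1):
--         weight_matrix[0][j] = weight_matrix[0][j-1] + right[0][j-1]
--
--     for i in range(1, n+1):
--         for j in range(1, m+1):
--             try:
--                 weight_matrix[i][j] = max(weight_matrix[i-1][j] + down[i-1][j], weight_matrix[i][j-1] + right[i][j-1], weight_matrix[i-1][j-1] + cross[i][j])
--             except Exception as e:
--                 weight_matrix[i][j] = max(weight_matrix[i-1][j] + down[i-1][j], weight_matrix[i][j-1] + right[i][j-1])
--     return weight_matrix[n][m]
-- ===== SOURCE B (Python) =====
-- def manhattan_tourist(n, m, down, right, cross=None):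
--     # Anti-diagonal wavefront: cells are processed in order of i+j (diagonals),
--     # keeping only the last two diagonals; prevK holds diagonal d-K starting at row loK.
--     prev2, lo2 = [], 0
--     prev1, lo1 = [0], 0
--     for d in range(1, n + m + 1):
--         lo = d - m if d > m else 0
--         hi = n if d > n else d
--         cur = []
--         for i in range(lo, hi + 1):
--             j = d - i
--             if j == 0:
--                 v = prev1[i - 1 - lo1] + down[i - 1][0]
--             elif i == 0:
--                 v = prev1[0 - lo1] + right[0][j - 1]
--             else:
--                 v = max(prev1[i - 1 - lo1] + down[i - 1][j],
--                         prev1[i - lo1] + right[i][j - 1])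
--                 try:
--                     v = max(v, prev2[i - 1 - lo2] + cross[i][j])
--                 except Exception:
--                     pass
--             cur.append(v)
--         prev2, lo2, prev1, lo1 = prev1, lo1, cur, lo
--     return prev1[n - lo1]
-- ===== Notes on version B (the rewrite author's own statement) =====
-- stated objective: alternative
-- what changed: Replaces A's row-major fill of a full (n+1)x(m+1) table (four separate loops mutating it in place) with an anti-diagonal wavefront traversal: cells are visited in order of i+j, one diagonal at a time, each diagonal computed from the previous two diagonals only (O(min(n,m)) state).
import Mathlib
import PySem

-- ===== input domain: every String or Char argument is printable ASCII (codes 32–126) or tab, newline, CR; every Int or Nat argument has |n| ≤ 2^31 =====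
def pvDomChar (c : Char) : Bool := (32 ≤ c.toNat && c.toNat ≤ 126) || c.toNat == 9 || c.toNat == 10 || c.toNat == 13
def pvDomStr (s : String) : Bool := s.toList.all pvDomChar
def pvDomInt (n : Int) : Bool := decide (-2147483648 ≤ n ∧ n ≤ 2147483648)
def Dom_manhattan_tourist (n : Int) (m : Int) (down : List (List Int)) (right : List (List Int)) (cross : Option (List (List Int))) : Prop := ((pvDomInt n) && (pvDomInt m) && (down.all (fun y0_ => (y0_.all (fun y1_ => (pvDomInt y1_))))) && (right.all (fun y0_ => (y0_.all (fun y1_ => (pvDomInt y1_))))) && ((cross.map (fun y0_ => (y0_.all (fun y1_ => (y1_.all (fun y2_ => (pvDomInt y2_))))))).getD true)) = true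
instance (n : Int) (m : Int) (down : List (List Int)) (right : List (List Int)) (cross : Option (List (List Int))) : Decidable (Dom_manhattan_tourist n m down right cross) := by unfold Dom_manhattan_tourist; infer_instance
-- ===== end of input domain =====

-- B replaces A's row-major fill of a full (n+1)x(m+1) table (four in-place loops) with an
-- anti-diagonal wavefront keeping only the last two diagonals; equivalence proved on Pre_.


-- ===== PORT A =====
-- weight_matrix[i][j] (read); indices used by A are nonnegative and in range under Pre_
def pvGet2 (w : List (List Int)) (i j : Int) : Int :=
  PySem.List.pyGetD (PySem.List.pyGetD w i []) j 0

-- weight_matrix[i][j] = v; A only assigns at nonnegative in-range indices under Pre_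
def pvSet2 (w : List (List Int)) (i j : Int) (v : Int) : List (List Int) :=
  w.set i.toNat ((PySem.List.pyGetD w i []).set j.toNat v)

-- the try/except body: 3-way max; cross[i][j] failing (None / out of range) falls to 2-way max
def pvCellA (down right : List (List Int)) (cross : Option (List (List Int)))
    (w : List (List Int)) (i j : Int) : Int :=
  let two := max (pvGet2 w (i-1) j + PySem.List.pyGetD (PySem.List.pyGetD down (i-1) []) j 0)
                 (pvGet2 w i (j-1) + PySem.List.pyGetD (PySem.List.pyGetD right i []) (j-1) 0)
  match cross with
  | none => two
  | some c =>
    match PySem.List.pyGet? c i with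
    | none => two
    | some row =>
      match PySem.List.pyGet? row j with
      | none => two
      | some x => max two (pvGet2 w (i-1) (j-1) + x)

def manhattan_tourist (n : Int) (m : Int) (down : List (List Int)) (right : List (List Int)) (cross : Option (List (List Int))) : Int :=
  let wm := (PySem.List.pyRange 0 (n+1) 1).foldl
      (fun w _ => w ++ [List.replicate (m+1).toNat 0]) []
  let wm := (PySem.List.pyRange 1 (n+1) 1).foldl
      (fun w i => pvSet2 w i 0 (pvGet2 w (i-1) 0 + PySem.List.pyGetD (PySem.List.pyGetD down (i-1) []) 0 0)) wm
  let wm := (PySem.List.pyRange 1 (m+1) 1).foldl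
      (fun w j => pvSet2 w 0 j (pvGet2 w 0 (j-1) + PySem.List.pyGetD (PySem.List.pyGetD right 0 []) (j-1) 0)) wm
  let wm := (PySem.List.pyRange 1 (n+1) 1).foldl
      (fun w i => (PySem.List.pyRange 1 (m+1) 1).foldl
        (fun w j => pvSet2 w i j (pvCellA down right cross w i j)) w) wm
  pvGet2 wm n m

-- ===== PORT B =====
-- one wavefront cell (i, d-i): boundary branches, else 2-way max improved by the diagonal
-- when cross[i][j] exists (same try/except shape); prevK is diagonal d-K starting at row loK
def pvDiagCell (down right : List (List Int)) (cross : Option (List (List Int)))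
    (prev2 : List Int) (lo2 : Int) (prev1 : List Int) (lo1 : Int) (d i : Int) : Int :=
  let j := d - i
  if j = 0 then
    PySem.List.pyGetD prev1 (i-1-lo1) 0 + PySem.List.pyGetD (PySem.List.pyGetD down (i-1) []) 0 0
  else if i = 0 then
    PySem.List.pyGetD prev1 (0-lo1) 0 + PySem.List.pyGetD (PySem.List.pyGetD right 0 []) (j-1) 0
  else
    let v0 := max (PySem.List.pyGetD prev1 (i-1-lo1) 0 + PySem.List.pyGetD (PySem.List.pyGetD down (i-1) []) j 0)
                  (PySem.List.pyGetD prev1 (i-lo1) 0 + PySem.List.pyGetD (PySem.List.pyGetD right i []) (j-1) 0)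
    match cross with
    | none => v0
    | some c =>
      match PySem.List.pyGet? c i with
      | none => v0
      | some crow =>
        match PySem.List.pyGet? crow j with
        | none => v0
        | some x => max v0 (PySem.List.pyGetD prev2 (i-1-lo2) 0 + x)

def manhattan_tourist_alt (n : Int) (m : Int) (down : List (List Int)) (right : List (List Int)) (cross : Option (List (List Int))) : Int :=
  let st := (PySem.List.pyRange 1 (n+m+1) 1).foldl
    (fun (st : List Int × Int × List Int × Int) d =>
      let lo : Int := if m < d then d - m else 0
      let hi : Int := if n < d then n else d
      let cur := (PySem.List.pyRange lo (hi+1) 1).foldl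
        (fun cur i => cur ++ [pvDiagCell down right cross st.1 st.2.1 st.2.2.1 st.2.2.2 d i]) []
      (st.2.2.1, st.2.2.2, cur, lo))
    (([] : List Int), (0:Int), ([0] : List Int), (0:Int))
  PySem.List.pyGetD st.2.2.1 (n - st.2.2.2) 0

-- ===== PRECONDITION & SPEC =====
-- Pre_ = exactly the inputs where A returns: n,m ≥ 0; the first n rows of down exist with
-- length ≥ m+1; and, unless m = 0 (right is then never read), the first n+1 rows of right
-- exist with length ≥ m.  Everywhere else A raises (IndexError/TypeError).
def Pre_manhattan_tourist (n : Int) (m : Int) (down : List (List Int)) (right : List (List Int)) (cross : Option (List (List Int))) : Prop :=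
  0 ≤ n ∧ 0 ≤ m ∧
  n.toNat ≤ down.length ∧ (∀ r ∈ down.take n.toNat, m.toNat + 1 ≤ r.length) ∧
  (m = 0 ∨ (n.toNat + 1 ≤ right.length ∧ ∀ r ∈ right.take (n.toNat + 1), m.toNat ≤ r.length))
instance (n : Int) (m : Int) (down : List (List Int)) (right : List (List Int)) (cross : Option (List (List Int))) : Decidable (Pre_manhattan_tourist n m down right cross) := by unfold Pre_manhattan_tourist; infer_instance

def pvWitness_manhattan_tourist : Int × Int × List (List Int) × List (List Int) × Option (List (List Int)) :=
  (1, 1, [[2, 3]], [[4], [5]], none)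

def Spec_manhattan_tourist (n : Int) (m : Int) (down : List (List Int)) (right : List (List Int)) (cross : Option (List (List Int))) (out : Int) : Prop := out = manhattan_tourist_alt n m down right cross
instance (n : Int) (m : Int) (down : List (List Int)) (right : List (List Int)) (cross : Option (List (List Int))) (out : Int) : Decidable (Spec_manhattan_tourist n m down right cross out) := by unfold Spec_manhattan_tourist; infer_instance

-- ===== CLAIM (what is proved, stated in full; the proofs are below) =====
def Claim_equal_manhattan_tourist : Prop := ∀ (n : Int) (m : Int) (down : List (List Int)) (right : List (List Int)) (cross : Option (List (List Int))), Dom_manhattan_tourist n m down right cross → Pre_manhattan_tourist n m down right cross → Spec_manhattan_tourist n m down right cross (manhattan_tourist n m down right cross)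

-- ===== LEMMAS AND PROOFS =====

-- the common functional spec: pvW i j = max path weight to cell (i, j), with A's exact
-- out-of-range defaults (getD 0 / getElem?) so that it needs no precondition
def pvW (down right : List (List Int)) (cross : Option (List (List Int))) : Nat → Nat → Int
  | 0, 0 => 0
  | i+1, 0 => pvW down right cross i 0 + (down.getD i []).getD 0 0
  | 0, j+1 => pvW down right cross 0 j + (right.getD 0 []).getD j 0
  | i+1, j+1 =>
    let two := max (pvW down right cross i (j+1) + (down.getD i []).getD (j+1) 0)
                   (pvW down right cross (i+1) j + (right.getD (i+1) []).getD j 0)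
    match cross with
    | none => two
    | some c =>
      match getElem? c (i+1) with
      | none => two
      | some crow =>
        match getElem? crow (j+1) with
        | none => two
        | some x => max two (pvW down right cross i j + x)

-- Nat-level description of A's rows
def pvColC (down : List (List Int)) : Nat → Int
  | 0 => 0
  | i+1 => pvColC down i + (down.getD i []).getD 0 0

def pvRow0N (right : List (List Int)) : Nat → List Int
  | 0 => [0]
  | k+1 => pvRow0N right k ++ [(pvRow0N right k).getLastD 0 + (right.getD 0 []).getD k 0]

def pvCellN (down right : List (List Int)) (cross : Option (List (List Int)))
    (prev : List Int) (last : Int) (i j : Nat) : Int :=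
  let two := max (prev.getD j 0 + (down.getD (i-1) []).getD j 0)
                 (last + (right.getD i []).getD (j-1) 0)
  match cross with
  | none => two
  | some c =>
    match getElem? c i with
    | none => two
    | some crow =>
      match getElem? crow j with
      | none => two
      | some x => max two (prev.getD (j-1) 0 + x)

def pvAuxN (down right : List (List Int)) (cross : Option (List (List Int)))
    (prev : List Int) (i : Nat) : Nat → List Int
  | 0 => [prev.getD 0 0 + (down.getD (i-1) []).getD 0 0]
  | k+1 => pvAuxN down right cross prev i k ++
      [pvCellN down right cross prev ((pvAuxN down right cross prev i k).getLastD 0) i (k+1)]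

def pvRowN (down right : List (List Int)) (cross : Option (List (List Int))) (M : Nat) : Nat → List Int
  | 0 => pvRow0N right M
  | i+1 => pvAuxN down right cross (pvRowN down right cross M i) (i+1) M

-- basic facts
lemma pvRow0N_length (right : List (List Int)) (k : Nat) : (pvRow0N right k).length = k + 1 := by
  induction k with
  | zero => rfl
  | succ k ih => simp [pvRow0N, ih]

lemma pvAuxN_length (down right : List (List Int)) (cross : Option (List (List Int)))
    (prev : List Int) (i k : Nat) : (pvAuxN down right cross prev i k).length = k + 1 := by
  induction k with
  | zero => rfl
  | succ k ih => simp [pvAuxN, ih]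

lemma pvRowN_length (down right : List (List Int)) (cross : Option (List (List Int))) (M i : Nat) :
    (pvRowN down right cross M i).length = M + 1 := by
  cases i with
  | zero => exact pvRow0N_length right M
  | succ i => exact pvAuxN_length down right cross _ _ M

lemma pvRow0N_ne_nil (right : List (List Int)) (k : Nat) : pvRow0N right k ≠ [] := by
  have := pvRow0N_length right k
  intro h; rw [h] at this; simp at this

lemma getD_last_eq_getLastD (xs : List Int) (k : Nat) (h : xs.length = k + 1) :
    xs.getD k 0 = xs.getLastD 0 := by
  rw [List.getLastD_eq_getLast?, List.getLast?_eq_getElem?, List.getD_eq_getElem?_getD, h]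
  simp

-- head of each row
lemma pvRow0N_head (right : List (List Int)) (k : Nat) : (pvRow0N right k).getD 0 0 = 0 := by
  induction k with
  | zero => rfl
  | succ k ih =>
    have h := pvRow0N_ne_nil right k
    rw [pvRow0N, List.getD_append _ _ _ _ (by simpa using List.length_pos_iff.mpr h)]
    exact ih

lemma pvAuxN_head (down right : List (List Int)) (cross : Option (List (List Int)))
    (prev : List Int) (i k : Nat) :
    (pvAuxN down right cross prev i k).getD 0 0 = prev.getD 0 0 + (down.getD (i-1) []).getD 0 0 := by
  induction k with
  | zero => rfl
  | succ k ih =>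
    have h : 0 < (pvAuxN down right cross prev i k).length := by
      rw [pvAuxN_length]; omega
    rw [pvAuxN, List.getD_append _ _ _ _ h]
    exact ih

lemma pvRowN_head (down right : List (List Int)) (cross : Option (List (List Int))) (M i : Nat) :
    (pvRowN down right cross M i).getD 0 0 = pvColC down i := by
  induction i with
  | zero => simpa [pvRowN, pvColC] using pvRow0N_head right M
  | succ i ih =>
    rw [pvRowN, pvAuxN_head, pvColC, ih]
    simp

-- ===== A-side: the table program computes pvRowN =====
def pvZRow (M : Nat) : List Int := 0 :: List.replicate M 0

def pvTodo (down : List (List Int)) (M s cnt : Nat) : List (List Int) :=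
  (List.range' s cnt).map (fun i => pvColC down i :: List.replicate M 0)

lemma getD_map_range' {α : Type} [Inhabited α] (f : Nat → α) (n k : Nat) (rest : List α) (h : k < n) (d : α) :
    ((List.range' 0 n).map f ++ rest).getD k d = f k := by
  rw [List.getD_append _ _ _ _ (by simp; omega)]
  simp [List.getD_eq_getElem?_getD, h]

lemma getD_pvTodo (down : List (List Int)) (M n k : Nat) (rest : List (List Int)) (h : k < n) :
    (pvTodo down M 0 n ++ rest).getD k [] = pvColC down k :: List.replicate M 0 := by
  unfold pvTodo
  exact getD_map_range' _ n k rest h []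

lemma a_init (r : List Int) (N : Nat) :
    (PySem.List.pyRange 0 ((N : Int) + 1) 1).foldl (fun w _ => w ++ [r]) ([] : List (List Int))
      = List.replicate (N + 1) r := by
  rw [show (fun (w : List (List Int)) (_ : Int) => w ++ [r]) = (fun acc x => acc ++ [(fun (_ : Int) => r) x]) from rfl,
      PySem.List.foldl_append_singleton_eq_map]
  simp only [List.nil_append, List.map_const']
  rw [PySem.List.length_pyRange_one]
  congr 1

lemma a_col (down : List (List Int)) (M N : Nat) (k : Nat) (hk : k ≤ N) :
    (PySem.List.pyRange 1 ((k : Int) + 1) 1).foldl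
      (fun w i => pvSet2 w i 0 (pvGet2 w (i-1) 0 + PySem.List.pyGetD (PySem.List.pyGetD down (i-1) []) 0 0))
      (List.replicate (N + 1) (pvZRow M))
    = pvTodo down M 0 (k + 1) ++ List.replicate (N - k) (pvZRow M) := by
  induction k with
  | zero =>
    rw [show ((0:Nat):Int)+1 = 1 by norm_num, PySem.List.pyRange_one_eq_nil (le_refl 1)]
    have : N + 1 = 1 + N := by omega
    simp [pvTodo, pvZRow, pvColC, this, List.replicate_add]
  | succ k ih =>
    rw [show ((k+1:Nat):Int) = (k:Int)+1 by push_cast; ring,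
        PySem.List.pyRange_one_succ_right (a := 1) (b := (k:Int)+1) (by omega),
        List.foldl_append, ih (by omega)]
    simp only [List.foldl_cons, List.foldl_nil]
    rw [show ((k:Int)+1)-1 = ((k:Nat):Int) by ring]
    unfold pvGet2 pvSet2
    rw [PySem.List.pyGetD_natCast, PySem.List.pyGetD_natCast,
        show ((k:Int)+1) = ((k+1:Nat):Int) by push_cast; ring, PySem.List.pyGetD_natCast]
    rw [getD_pvTodo down M (k+1) k _ (by omega), PySem.List.pyGetD_zero_cons, Int.toNat_zero]
    rw [List.getD_append_right _ _ _ _ (by simp [pvTodo])]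
    have hlen : (pvTodo down M 0 (k+1)).length = k + 1 := by simp [pvTodo]
    rw [show (List.replicate (N-k) (pvZRow M)).getD (k+1 - (pvTodo down M 0 (k+1)).length) [] = pvZRow M by
      rw [hlen]; simp; rw [show N - k = (N-k-1)+1 by omega]; simp [List.replicate_succ]]
    rw [List.set_append_right _ _ (by simp [hlen]), Int.toNat_natCast, hlen]
    rw [show k + 1 - (k+1) = 0 by omega]
    rw [show N - k = (N-k-1)+1 by omega, List.replicate_succ, List.set_cons_zero]
    rw [show N - k - 1 = N - (k+1) by omega]
    rw [show pvTodo down M 0 (k+2) = pvTodo down M 0 (k+1) ++ [pvColC down (k+1) :: List.replicate M 0] by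
      unfold pvTodo; rw [List.range'_1_concat]; simp]
    simp only [pvZRow, List.set_cons_zero, List.append_assoc, List.cons_append, List.nil_append]
    rw [PySem.List.pyGetD_zero]
    rw [show pvColC down k + (down.getD k []).getD 0 0 = pvColC down (k+1) from rfl]

lemma a_row0 (down right : List (List Int)) (M N : Nat) (t : Nat) (ht : t ≤ M) :
    (PySem.List.pyRange 1 ((t : Int) + 1) 1).foldl
      (fun w j => pvSet2 w 0 j (pvGet2 w 0 (j-1) + PySem.List.pyGetD (PySem.List.pyGetD right 0 []) (j-1) 0))
      (pvTodo down M 0 (N + 1))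
    = (pvRow0N right t ++ List.replicate (M - t) 0) :: pvTodo down M 1 N := by
  induction t with
  | zero =>
    rw [show ((0:Nat):Int)+1 = 1 by norm_num, PySem.List.pyRange_one_eq_nil (le_refl 1)]
    unfold pvTodo
    rw [List.range'_succ]
    simp [pvRow0N, pvColC]
  | succ t ih =>
    rw [show ((t+1:Nat):Int) = (t:Int)+1 by push_cast; ring,
        PySem.List.pyRange_one_succ_right (a := 1) (b := (t:Int)+1) (by omega),
        List.foldl_append, ih (by omega)]
    simp only [List.foldl_cons, List.foldl_nil]
    rw [show ((t:Int)+1)-1 = ((t:Nat):Int) by ring]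
    unfold pvGet2 pvSet2
    rw [PySem.List.pyGetD_zero, PySem.List.pyGetD_zero, List.getD_cons_zero,
        PySem.List.pyGetD_natCast, PySem.List.pyGetD_natCast,
        List.getD_append _ _ _ _ (by rw [pvRow0N_length]; omega),
        getD_last_eq_getLastD _ t (pvRow0N_length right t),
        Int.toNat_zero, List.set_cons_zero,
        show ((t:Int)+1) = ((t+1:Nat):Int) by push_cast; ring, Int.toNat_natCast,
        List.set_append_right _ _ (by rw [pvRow0N_length]),
        pvRow0N_length,
        show t + 1 - (t+1) = 0 by omega,
        show M - t = (M-t-1)+1 by omega, List.replicate_succ, List.set_cons_zero,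
        show M - t - 1 = M - (t+1) by omega]
    show (pvRow0N right t ++ _ :: List.replicate (M-(t+1)) 0) :: _ = _
    rw [show pvRow0N right (t+1) = pvRow0N right t ++ [(pvRow0N right t).getLastD 0 + (right.getD 0 []).getD t 0] from rfl]
    simp

lemma cellA_eq (down right : List (List Int)) (cross : Option (List (List Int)))
    (w : List (List Int)) (prev aux pad : List Int) (k t : Nat)
    (hlen : aux.length = t + 1)
    (hprev : PySem.List.pyGetD w (k : Int) [] = prev)
    (hcur : PySem.List.pyGetD w ((k : Int) + 1) [] = aux ++ pad) :
    pvCellA down right cross w ((k : Int) + 1) ((t : Int) + 1)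
      = pvCellN down right cross prev (aux.getLastD 0) (k + 1) (t + 1) := by
  simp only [pvCellA, pvCellN, pvGet2]
  rw [show ((k:Int)+1)-1 = ((k:Nat):Int) by ring, show ((t:Int)+1)-1 = ((t:Nat):Int) by ring,
      hprev, hcur,
      show ((t:Int)+1) = ((t+1:Nat):Int) by push_cast; ring,
      show ((k:Int)+1) = ((k+1:Nat):Int) by push_cast; ring]
  rw [PySem.List.pyGetD_natCast, PySem.List.pyGetD_natCast, PySem.List.pyGetD_natCast,
      PySem.List.pyGetD_natCast, PySem.List.pyGetD_natCast]
  rw [List.getD_append _ _ _ _ (by omega), getD_last_eq_getLastD _ t hlen]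
  simp only [PySem.List.pyGet?_natCast, PySem.List.pyGetD_natCast, Nat.add_sub_cancel,
    List.getD_eq_getElem?_getD]

lemma a_inner (down right : List (List Int)) (cross : Option (List (List Int)))
    (M k : Nat) (R : List (List Int)) (t : Nat) (ht : t ≤ M) :
    (PySem.List.pyRange 1 ((t : Int) + 1) 1).foldl
      (fun w j => pvSet2 w ((k : Int) + 1) j (pvCellA down right cross w ((k : Int) + 1) j))
      ((List.range' 0 (k + 1)).map (pvRowN down right cross M) ++
        ((pvAuxN down right cross (pvRowN down right cross M k) (k + 1) 0 ++ List.replicate M 0) :: R))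
    = (List.range' 0 (k + 1)).map (pvRowN down right cross M) ++
        ((pvAuxN down right cross (pvRowN down right cross M k) (k + 1) t ++ List.replicate (M - t) 0) :: R) := by
  induction t with
  | zero =>
    rw [show ((0:Nat):Int)+1 = 1 by norm_num, PySem.List.pyRange_one_eq_nil (le_refl 1)]
    simp
  | succ t ih =>
    have hL : ((List.range' 0 (k+1)).map (pvRowN down right cross M)).length = k + 1 := by simp
    rw [show ((t+1:Nat):Int) = (t:Int)+1 by push_cast; ring,
        PySem.List.pyRange_one_succ_right (a := 1) (b := (t:Int)+1) (by omega),
        List.foldl_append, ih (by omega)]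
    simp only [List.foldl_cons, List.foldl_nil]
    have hcur : PySem.List.pyGetD ((List.range' 0 (k+1)).map (pvRowN down right cross M) ++
        ((pvAuxN down right cross (pvRowN down right cross M k) (k + 1) t ++ List.replicate (M - t) 0) :: R)) ((k:Int)+1) []
        = pvAuxN down right cross (pvRowN down right cross M k) (k + 1) t ++ List.replicate (M - t) 0 := by
      rw [show ((k:Int)+1) = ((k+1:Nat):Int) by push_cast; ring, PySem.List.pyGetD_natCast,
          List.getD_append_right _ _ _ _ (by rw [hL]), hL, show k + 1 - (k+1) = 0 by omega,
          List.getD_cons_zero]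
    have hprev : PySem.List.pyGetD ((List.range' 0 (k+1)).map (pvRowN down right cross M) ++
        ((pvAuxN down right cross (pvRowN down right cross M k) (k + 1) t ++ List.replicate (M - t) 0) :: R)) ((k:Nat):Int) []
        = pvRowN down right cross M k := by
      rw [PySem.List.pyGetD_natCast]
      exact getD_map_range' _ (k+1) k _ (by omega) []
    rw [pvSet2, cellA_eq down right cross _ _ _ _ k t
          (pvAuxN_length down right cross (pvRowN down right cross M k) (k+1) t) hprev hcur,
        hcur,
        show ((k:Int)+1) = ((k+1:Nat):Int) by push_cast; ring, Int.toNat_natCast,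
        show ((t:Int)+1) = ((t+1:Nat):Int) by push_cast; ring, Int.toNat_natCast,
        List.set_append_right _ _ (by rw [hL]), hL, show k + 1 - (k+1) = 0 by omega,
        List.set_cons_zero,
        List.set_append_right _ _ (by rw [pvAuxN_length]),
        pvAuxN_length,
        show t + 1 - (t+1) = 0 by omega,
        show M - t = (M-t-1)+1 by omega, List.replicate_succ, List.set_cons_zero,
        show M - t - 1 = M - (t+1) by omega]
    rw [show pvAuxN down right cross (pvRowN down right cross M k) (k+1) (t+1)
          = pvAuxN down right cross (pvRowN down right cross M k) (k+1) t ++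
            [pvCellN down right cross (pvRowN down right cross M k)
              ((pvAuxN down right cross (pvRowN down right cross M k) (k+1) t).getLastD 0) (k+1) (t+1)] from rfl]
    simp

lemma a_outer (down right : List (List Int)) (cross : Option (List (List Int)))
    (M N : Nat) (K : Nat) (hK : K ≤ N) :
    (PySem.List.pyRange 1 ((K : Int) + 1) 1).foldl
      (fun w i => (PySem.List.pyRange 1 ((M : Int) + 1) 1).foldl
        (fun w j => pvSet2 w i j (pvCellA down right cross w i j)) w)
      ((pvRow0N right M ++ List.replicate (M - M) 0) :: pvTodo down M 1 N)
    = (List.range' 0 (K + 1)).map (pvRowN down right cross M) ++ pvTodo down M (K + 1) (N - K) := by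
  induction K with
  | zero =>
    rw [show ((0:Nat):Int)+1 = 1 by norm_num, PySem.List.pyRange_one_eq_nil (le_refl 1)]
    simp [pvRowN]
  | succ K ih =>
    rw [show ((K+1:Nat):Int) = (K:Int)+1 by push_cast; ring,
        PySem.List.pyRange_one_succ_right (a := 1) (b := (K:Int)+1) (by omega),
        List.foldl_append, ih (by omega)]
    simp only [List.foldl_cons, List.foldl_nil]
    rw [show pvTodo down M (K+1) (N-K) = (pvColC down (K+1) :: List.replicate M 0) ::
          pvTodo down M (K+2) (N-K-1) by
        unfold pvTodo
        rw [show N - K = (N-K-1)+1 by omega, List.range'_succ]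
        simp]
    rw [show pvColC down (K+1) :: List.replicate M 0
          = pvAuxN down right cross (pvRowN down right cross M K) (K+1) 0 ++ List.replicate M 0 by
        rw [show pvAuxN down right cross (pvRowN down right cross M K) (K+1) 0
              = [(pvRowN down right cross M K).getD 0 0 + (down.getD ((K+1)-1) []).getD 0 0] from rfl,
            pvRowN_head, Nat.add_sub_cancel]
        rw [show pvColC down (K+1) = pvColC down K + (down.getD K []).getD 0 0 from rfl]
        simp]
    rw [a_inner down right cross M K (pvTodo down M (K+2) (N-K-1)) M (le_refl M)]
    rw [show pvAuxN down right cross (pvRowN down right cross M K) (K+1) M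
          = pvRowN down right cross M (K+1) from rfl]
    rw [show (List.range' 0 (K+1+1)).map (pvRowN down right cross M)
          = (List.range' 0 (K+1)).map (pvRowN down right cross M) ++ [pvRowN down right cross M (K+1)] by
        rw [List.range'_1_concat]; simp]
    simp [show N - K - 1 = N - (K+1) by omega]

lemma a_eq (n m : Int) (down right : List (List Int)) (cross : Option (List (List Int)))
    (hn : 0 ≤ n) (hm : 0 ≤ m) :
    manhattan_tourist n m down right cross
      = (pvRowN down right cross m.toNat n.toNat).getLastD 0 := by
  unfold manhattan_tourist
  dsimp only
  rw [show m = ((m.toNat:Nat):Int) by omega, show n = ((n.toNat:Nat):Int) by omega]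
  rw [a_init _ n.toNat]
  rw [show List.replicate ((((m.toNat:Nat):Int)+1).toNat) (0:Int) = pvZRow m.toNat by
        rw [show (((m.toNat:Nat):Int)+1).toNat = m.toNat + 1 by omega, pvZRow, List.replicate_succ]]
  rw [a_col down m.toNat n.toNat n.toNat (le_refl _),
      show n.toNat - n.toNat = 0 by omega]
  simp only [List.replicate_zero, List.append_nil]
  rw [a_row0 down right m.toNat n.toNat m.toNat (le_refl _),
      a_outer down right cross m.toNat n.toNat n.toNat (le_refl _)]
  unfold pvGet2
  rw [PySem.List.pyGetD_natCast, PySem.List.pyGetD_natCast]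
  rw [show pvTodo down m.toNat (n.toNat+1) (n.toNat - n.toNat) = ([] : List (List Int)) by
        simp [pvTodo]]
  rw [getD_map_range' _ (n.toNat+1) n.toNat [] (by omega)]
  rw [getD_last_eq_getLastD _ m.toNat (pvRowN_length down right cross m.toNat n.toNat)]
  simp
  rw [show max m 0 = m by omega, show max n 0 = n by omega]
lemma pvW_succ_zero (down right : List (List Int)) (cross : Option (List (List Int))) (i : Nat) :
    pvW down right cross (i+1) 0 = pvW down right cross i 0 + (down.getD i []).getD 0 0 := by
  rw [pvW.eq_def]

lemma pvW_zero_succ (down right : List (List Int)) (cross : Option (List (List Int))) (j : Nat) :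
    pvW down right cross 0 (j+1) = pvW down right cross 0 j + (right.getD 0 []).getD j 0 := by
  rw [pvW.eq_def]

lemma pvW_zero_zero (down right : List (List Int)) (cross : Option (List (List Int))) :
    pvW down right cross 0 0 = 0 := by
  rw [pvW.eq_def]

-- the cross-improvement step shared by every formulation (proof-side only)
def pvImp (cross : Option (List (List Int))) (i j : Nat) (base diagv : Int) : Int :=
  match cross with
  | none => base
  | some c =>
    match getElem? c i with
    | none => base
    | some crow =>
      match getElem? crow j with
      | none => base
      | some x => max base (diagv + x)

lemma pvW_succ_succ (down right : List (List Int)) (cross : Option (List (List Int))) (i j : Nat) :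
    pvW down right cross (i+1) (j+1) =
      pvImp cross (i+1) (j+1)
        (max (pvW down right cross i (j+1) + (down.getD i []).getD (j+1) 0)
             (pvW down right cross (i+1) j + (right.getD (i+1) []).getD j 0))
        (pvW down right cross i j) := by
  rw [pvW.eq_def]
  cases cross with
  | none => simp [pvImp]
  | some c =>
    cases hc : getElem? c (i+1) with
    | none => simp [pvImp, hc]
    | some crow =>
      cases hcr : getElem? crow (j+1) with
      | none => simp [pvImp, hc, hcr]
      | some x => simp [pvImp, hc, hcr]

lemma cellN_imp (down right : List (List Int)) (cross : Option (List (List Int)))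
    (prev : List Int) (last : Int) (i j : Nat) :
    pvCellN down right cross prev last i j =
      pvImp cross i j
        (max (prev.getD j 0 + (down.getD (i-1) []).getD j 0)
             (last + (right.getD i []).getD (j-1) 0))
        (prev.getD (j-1) 0) := by
  cases cross with
  | none => rfl
  | some c =>
    cases hc : getElem? c i with
    | none => simp [pvCellN, pvImp, hc]
    | some crow =>
      cases hcr : getElem? crow j with
      | none => simp [pvCellN, pvImp, hc, hcr]
      | some x => simp [pvCellN, pvImp, hc, hcr]

-- ===== A's table equals pvW =====
lemma cellN_eq_W (down right : List (List Int)) (cross : Option (List (List Int)))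
    (prev : List Int) (i j : Nat)
    (h1 : prev.getD (j+1) 0 = pvW down right cross i (j+1))
    (h2 : prev.getD j 0 = pvW down right cross i j) :
    pvCellN down right cross prev (pvW down right cross (i+1) j) (i+1) (j+1)
      = pvW down right cross (i+1) (j+1) := by
  rw [cellN_imp, pvW_succ_succ]
  simp only [Nat.add_sub_cancel, h1, h2]

lemma row0_W (down right : List (List Int)) (cross : Option (List (List Int))) (k : Nat) :
    ∀ j, j ≤ k → (pvRow0N right k).getD j 0 = pvW down right cross 0 j := by
  induction k with
  | zero =>
    intro j hj
    have : j = 0 := by omega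
    subst this
    simp [pvRow0N, pvW_zero_zero]
  | succ k ih =>
    intro j hj
    have hl := pvRow0N_length right k
    by_cases hjk : j ≤ k
    · rw [pvRow0N, List.getD_append _ _ _ _ (by omega)]
      exact ih j hjk
    · have : j = k + 1 := by omega
      subst this
      rw [pvRow0N, List.getD_append_right _ _ _ _ (by omega), hl,
          show k + 1 - (k+1) = 0 by omega, List.getD_cons_zero,
          ← getD_last_eq_getLastD _ k hl, ih k (le_refl k), ← pvW_zero_succ]

lemma aux_W (down right : List (List Int)) (cross : Option (List (List Int)))
    (prev : List Int) (i K : Nat)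
    (hprev : ∀ j', j' ≤ K → prev.getD j' 0 = pvW down right cross i j') :
    ∀ k, k ≤ K → ∀ j, j ≤ k →
      (pvAuxN down right cross prev (i+1) k).getD j 0 = pvW down right cross (i+1) j := by
  intro k
  induction k with
  | zero =>
    intro _ j hj
    have : j = 0 := by omega
    subst this
    show prev.getD 0 0 + (down.getD ((i+1)-1) []).getD 0 0 = _
    rw [Nat.add_sub_cancel, hprev 0 (by omega), ← pvW_succ_zero]
  | succ k ih =>
    intro hk j hj
    have hl := pvAuxN_length down right cross prev (i+1) k
    by_cases hjk : j ≤ k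
    · rw [pvAuxN, List.getD_append _ _ _ _ (by omega)]
      exact ih (by omega) j hjk
    · have : j = k + 1 := by omega
      subst this
      rw [pvAuxN, List.getD_append_right _ _ _ _ (by omega), hl,
          show k + 1 - (k+1) = 0 by omega, List.getD_cons_zero,
          ← getD_last_eq_getLastD _ k hl, ih (by omega) k (le_refl k)]
      exact cellN_eq_W down right cross prev i k (hprev (k+1) (by omega)) (hprev k (by omega))

lemma rowN_W (down right : List (List Int)) (cross : Option (List (List Int))) (M : Nat) :
    ∀ i j, j ≤ M → (pvRowN down right cross M i).getD j 0 = pvW down right cross i j := by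
  intro i
  induction i with
  | zero => exact row0_W down right cross M
  | succ i ih =>
    intro j hj
    exact aux_W down right cross (pvRowN down right cross M i) i M ih M (le_refl M) j hj

lemma a_eq_W (n m : Int) (down right : List (List Int)) (cross : Option (List (List Int)))
    (hn : 0 ≤ n) (hm : 0 ≤ m) :
    manhattan_tourist n m down right cross = pvW down right cross n.toNat m.toNat := by
  rw [a_eq n m down right cross hn hm,
      ← getD_last_eq_getLastD _ m.toNat (pvRowN_length down right cross m.toNat n.toNat),
      rowN_W down right cross m.toNat n.toNat m.toNat (le_refl _)]

-- ===== B's wavefront equals pvW =====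
-- diagonal d of the grid as a list: rows i = max(0, d-m) .. min(d, n)
def pvDiagN (down right : List (List Int)) (cross : Option (List (List Int))) (n m d : Nat) : List Int :=
  (List.range' (d - m) (min d n + 1 - (d - m))).map (fun i => pvW down right cross i (d - i))

def pvP2 (down right : List (List Int)) (cross : Option (List (List Int))) (n m D : Nat) : List Int :=
  if D = 0 then [] else pvDiagN down right cross n m (D - 1)

def pvL2 (m D : Nat) : Int :=
  if D = 0 then 0 else (((D - 1) - m : Nat) : Int)

lemma getD_map_range2 (f : Nat → Int) (lo cnt p : Nat) (h : p < cnt) :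
    ((List.range' lo cnt).map f).getD p 0 = f (lo + p) := by
  simp [List.getD_eq_getElem?_getD, h]

lemma diag_getD (down right : List (List Int)) (cross : Option (List (List Int)))
    (n m d i : Nat) (h1 : d - m ≤ i) (h2 : i ≤ min d n) :
    (pvDiagN down right cross n m d).getD (i - (d - m)) 0 = pvW down right cross i (d - i) := by
  unfold pvDiagN
  rw [getD_map_range2 _ _ _ _ (by omega), show (d - m) + (i - (d - m)) = i by omega]

lemma pyMatch_imp (cross : Option (List (List Int))) (i j : Nat) (base diagv : Int) :
    (match cross with
     | none => base
     | some c =>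
       match PySem.List.pyGet? c ((i : Nat) : Int) with
       | none => base
       | some crow =>
         match PySem.List.pyGet? crow ((j : Nat) : Int) with
         | none => base
         | some x => max base (diagv + x)) = pvImp cross i j base diagv := by
  cases cross with
  | none => rfl
  | some c =>
    dsimp only
    rw [PySem.List.pyGet?_natCast]
    cases hc : getElem? c i with
    | none => simp [pvImp, hc]
    | some crow =>
      dsimp only
      rw [PySem.List.pyGet?_natCast]
      cases hcr : getElem? crow j with
      | none => simp [pvImp, hc, hcr]
      | some x => simp [pvImp, hc, hcr]

lemma cell_W (down right : List (List Int)) (cross : Option (List (List Int)))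
    (n m d i : Nat) (hd1 : 1 ≤ d) (hd : d ≤ n + m) (hlo : d - m ≤ i) (hhi : i ≤ min d n)
    (P2 : List Int) (L2 : Int)
    (hP2 : 2 ≤ d → P2 = pvDiagN down right cross n m (d-2) ∧ L2 = (((d-2) - m : Nat) : Int)) :
    pvDiagCell down right cross P2 L2 (pvDiagN down right cross n m (d-1)) ((((d-1) - m : Nat)) : Int) (d : Int) (i : Int)
      = pvW down right cross i (d - i) := by
  unfold pvDiagCell
  by_cases hj : (d:Int) - (i:Int) = 0
  · -- bottom-left boundary of the diagonal: j = 0, i.e. i = d (and d ≤ n)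
    have hid : i = d := by omega
    have hdn : d ≤ n := by omega
    subst hid
    rw [if_pos hj]
    rw [show (i:Int) - 1 - ((((i-1) - m : Nat)) : Int) = (((i-1) - ((i-1) - m) : Nat) : Int) by omega,
        PySem.List.pyGetD_natCast,
        diag_getD down right cross n m (i-1) (i-1) (by omega) (by omega),
        show (i:Int) - 1 = ((i-1 : Nat) : Int) by omega,
        PySem.List.pyGetD_natCast, PySem.List.pyGetD_zero,
        Nat.sub_self, Nat.sub_self]
    conv_rhs => rw [show i = (i-1)+1 by omega]
    rw [pvW_succ_zero]
  · by_cases hi0 : (i:Int) = 0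
    · -- top boundary of the diagonal: i = 0 (and d ≤ m)
      have hi : i = 0 := by omega
      have hdm : d ≤ m := by omega
      subst hi
      rw [if_neg hj, if_pos hi0]
      rw [show (0:Int) - ((((d-1) - m : Nat)) : Int) = ((0 - ((d-1) - m) : Nat) : Int) by omega,
          PySem.List.pyGetD_natCast,
          diag_getD down right cross n m (d-1) 0 (by omega) (by omega),
          Nat.sub_zero, Nat.sub_zero,
          show (d:Int) - ((0:Nat) : Int) - 1 = ((d-1 : Nat) : Int) by omega,
          PySem.List.pyGetD_zero, PySem.List.pyGetD_natCast]
      conv_rhs => rw [show d = (d-1)+1 by omega]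
      rw [pvW_zero_succ]
    · -- interior cell: 1 ≤ i, 1 ≤ j = d - i
      have hi1 : 1 ≤ i := by omega
      have hidd : i + 1 ≤ d := by omega
      have hin : i ≤ n := by omega
      have hjm : d - i ≤ m := by omega
      have hd2 : 2 ≤ d := by omega
      obtain ⟨hp2, hl2⟩ := hP2 hd2
      subst hp2 hl2
      obtain ⟨a, ha⟩ : ∃ a, i = a + 1 := ⟨i - 1, by omega⟩
      subst ha
      obtain ⟨b, hb⟩ : ∃ b, d - (a + 1) = b + 1 := ⟨d - (a + 1) - 1, by omega⟩
      rw [if_neg hj, if_neg hi0]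
      rw [show ((a+1:Nat):Int) - 1 - ((((d-1) - m : Nat)) : Int) = ((a - ((d-1) - m) : Nat) : Int) by omega,
          show ((a+1:Nat):Int) - ((((d-1) - m : Nat)) : Int) = (((a+1) - ((d-1) - m) : Nat) : Int) by omega,
          show ((a+1:Nat):Int) - 1 - ((((d-2) - m : Nat)) : Int) = ((a - ((d-2) - m) : Nat) : Int) by omega,
          show (d:Int) - ((a+1:Nat):Int) - 1 = ((b : Nat) : Int) by omega,
          show (d:Int) - ((a+1:Nat):Int) = ((b + 1 : Nat) : Int) by omega,
          show ((a+1:Nat):Int) - 1 = ((a : Nat) : Int) by omega]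
      rw [PySem.List.pyGetD_natCast, PySem.List.pyGetD_natCast, PySem.List.pyGetD_natCast,
          PySem.List.pyGetD_natCast, PySem.List.pyGetD_natCast, PySem.List.pyGetD_natCast,
          PySem.List.pyGetD_natCast]
      rw [diag_getD down right cross n m (d-1) a (by omega) (by omega),
          diag_getD down right cross n m (d-1) (a+1) (by omega) (by omega),
          diag_getD down right cross n m (d-2) a (by omega) (by omega)]
      rw [show (d-1) - a = b + 1 by omega, show (d-1) - (a+1) = b by omega,
          show (d-2) - a = b by omega]
      rw [hb, pvW_succ_succ]
      exact pyMatch_imp cross (a+1) (b+1) _ _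
lemma b_inner (down right : List (List Int)) (cross : Option (List (List Int)))
    (n m d : Nat) (hd1 : 1 ≤ d) (hd : d ≤ n + m)
    (P2 : List Int) (L2 : Int)
    (hP2 : 2 ≤ d → P2 = pvDiagN down right cross n m (d-2) ∧ L2 = (((d-2) - m : Nat) : Int)) :
    ∀ c, (d - m) + c ≤ min d n + 1 →
    (PySem.List.pyRange (((d - m : Nat)) : Int) ((((d - m) + c : Nat)) : Int) 1).foldl
      (fun cur i => cur ++ [pvDiagCell down right cross P2 L2
        (pvDiagN down right cross n m (d-1)) ((((d-1) - m : Nat)) : Int) (d : Int) i]) []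
    = (List.range' (d - m) c).map (fun i => pvW down right cross i (d - i)) := by
  intro c
  induction c with
  | zero =>
    intro _
    rw [Nat.add_zero, PySem.List.pyRange_one_eq_nil (le_refl _)]
    rfl
  | succ c ih =>
    intro hc
    rw [show ((((d - m) + (c+1) : Nat)) : Int) = ((((d - m) + c : Nat)) : Int) + 1 by push_cast; ring,
        PySem.List.pyRange_one_succ_right (by omega),
        List.foldl_append, ih (by omega)]
    simp only [List.foldl_cons, List.foldl_nil]
    rw [cell_W down right cross n m d ((d - m) + c) hd1 hd (by omega) (by omega) P2 L2 hP2]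
    rw [List.range'_1_concat, List.map_append]
    rfl

lemma b_inner_full (down right : List (List Int)) (cross : Option (List (List Int)))
    (n m d : Nat) (hd1 : 1 ≤ d) (hd : d ≤ n + m)
    (P2 : List Int) (L2 : Int)
    (hP2 : 2 ≤ d → P2 = pvDiagN down right cross n m (d-2) ∧ L2 = (((d-2) - m : Nat) : Int)) :
    (PySem.List.pyRange (((d - m : Nat)) : Int) (((min d n + 1 : Nat)) : Int) 1).foldl
      (fun cur i => cur ++ [pvDiagCell down right cross P2 L2
        (pvDiagN down right cross n m (d-1)) ((((d-1) - m : Nat)) : Int) (d : Int) i]) []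
    = pvDiagN down right cross n m d := by
  have hle : (d - m) + (min d n + 1 - (d - m)) = min d n + 1 := by omega
  rw [show ((min d n + 1 : Nat) : Int) = ((((d - m) + (min d n + 1 - (d - m)) : Nat)) : Int) by rw [hle]]
  rw [b_inner down right cross n m d hd1 hd P2 L2 hP2 (min d n + 1 - (d - m)) (by omega)]
  rfl

lemma b_outer (down right : List (List Int)) (cross : Option (List (List Int)))
    (n m : Nat) :
    ∀ D, D ≤ n + m →
    (PySem.List.pyRange 1 (((D : Nat) : Int) + 1) 1).foldl
      (fun (st : List Int × Int × List Int × Int) d =>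
        let lo : Int := if ((m : Nat) : Int) < d then d - ((m : Nat) : Int) else 0
        let hi : Int := if ((n : Nat) : Int) < d then ((n : Nat) : Int) else d
        let cur := (PySem.List.pyRange lo (hi+1) 1).foldl
          (fun cur i => cur ++ [pvDiagCell down right cross st.1 st.2.1 st.2.2.1 st.2.2.2 d i]) []
        (st.2.2.1, st.2.2.2, cur, lo))
      (([] : List Int), (0:Int), ([0] : List Int), (0:Int))
    = (pvP2 down right cross n m D, pvL2 m D, pvDiagN down right cross n m D, ((D - m : Nat) : Int)) := by
  intro D
  induction D with
  | zero =>
    intro _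
    rw [show (((0:Nat) : Nat) : Int) + 1 = 1 by norm_num, PySem.List.pyRange_one_eq_nil (le_refl 1)]
    simp [pvP2, pvL2, pvDiagN, pvW_zero_zero]
  | succ D ih =>
    intro hD
    rw [show (((D+1 : Nat)) : Int) + 1 = (((D : Nat)) : Int) + 1 + 1 by push_cast; ring,
        PySem.List.pyRange_one_succ_right (by omega),
        List.foldl_append, ih (by omega)]
    simp only [List.foldl_cons, List.foldl_nil]
    rw [show (if ((m : Nat) : Int) < ((D : Nat) : Int) + 1 then ((D : Nat) : Int) + 1 - ((m : Nat) : Int) else 0)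
          = (((D + 1) - m : Nat) : Int) by split_ifs <;> omega]
    rw [show (if ((n : Nat) : Int) < ((D : Nat) : Int) + 1 then ((n : Nat) : Int) else ((D : Nat) : Int) + 1) + 1
          = ((min (D+1) n + 1 : Nat) : Int) by split_ifs <;> omega]
    rw [show ((D : Nat) : Int) + 1 = (((D + 1 : Nat)) : Int) by push_cast; ring]
    have hstep := b_inner_full down right cross n m (D+1) (by omega) (by omega)
        (pvP2 down right cross n m D) (pvL2 m D)
        (by
          intro h2
          constructor
          · rw [pvP2, if_neg (by omega : ¬ D = 0)]
            rfl
          · rw [pvL2, if_neg (by omega : ¬ D = 0)]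
            omega)
    simp only [Nat.add_sub_cancel] at hstep
    rw [hstep]
    rw [pvP2, if_neg (by omega : ¬ D + 1 = 0), pvL2, if_neg (by omega : ¬ D + 1 = 0),
        Nat.add_sub_cancel]

lemma alt_eq_W (n m : Int) (down right : List (List Int)) (cross : Option (List (List Int)))
    (hn : 0 ≤ n) (hm : 0 ≤ m) :
    manhattan_tourist_alt n m down right cross = pvW down right cross n.toNat m.toNat := by
  unfold manhattan_tourist_alt
  dsimp only
  rw [show n = ((n.toNat : Nat) : Int) by omega, show m = ((m.toNat : Nat) : Int) by omega]
  rw [show ((n.toNat : Nat) : Int) + ((m.toNat : Nat) : Int) + 1 = (((n.toNat + m.toNat : Nat)) : Int) + 1 by push_cast; ring]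
  rw [b_outer down right cross n.toNat m.toNat (n.toNat + m.toNat) (le_refl _)]
  dsimp only
  rw [show (n.toNat + m.toNat) - m.toNat = n.toNat by omega]
  rw [show ((n.toNat : Nat) : Int) - ((n.toNat : Nat) : Int) = ((0 : Nat) : Int) by omega,
      PySem.List.pyGetD_natCast]
  have h := diag_getD down right cross n.toNat m.toNat (n.toNat + m.toNat) n.toNat (by omega) (by omega)
  rw [show n.toNat - ((n.toNat + m.toNat) - m.toNat) = 0 by omega,
      show (n.toNat + m.toNat) - n.toNat = m.toNat by omega] at h
  exact h

-- ===== VERDICT (by name: the statement is the Claim_ definition above) =====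
theorem manhattan_tourist_spec : Claim_equal_manhattan_tourist := by
  intro n m down right cross _ hpre
  unfold Spec_manhattan_tourist
  rw [a_eq_W n m down right cross hpre.1 hpre.2.1,
      alt_eq_W n m down right cross hpre.1 hpre.2.1]
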